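-- pv_equiv track=rewrite | github.com/jonkiparsky/adventofcode | 2022/day1.py | solve
-- ===== SOURCE A (Python) =====
-- def solve(lines):
--     current = 0
--     max_seen = 0
--
--     for line in lines:
--         if line.strip() == "":
--             current = 0
--         else:
--             current += int(line)
--             max_seen = max(max_seen, current)
--     return max_seen
-- ===== SOURCE B (Python) =====
-- def _prefix_sums(g):
--     sums = []
--     s = 0
--     for x in g:
--         s += x
--         sums.append(s)
--     return sums
--
--
-- def solve(lines):
--     # Pass 1: partition into groups of parsed ints, splitting at blank lines.
--     groups = []
--     cur = []
--     for line in lines: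
--         if line.strip() == "":
--             groups.append(cur)
--             cur = []
--         else:
--             cur.append(int(line))
--     groups.append(cur)
--     # Pass 2: the answer is the max (with a 0 floor) of all per-group prefix sums.
--     allsums = [p for g in groups for p in _prefix_sums(g)]
--     return max([0] + allsums)
-- ===== Notes on version B (the rewrite author's own statement) =====
-- stated objective: alternative
-- what changed: Replaces A's single interleaved accumulate-and-max loop with two passes: partition the lines into blank-separated groups of parsed ints, then take the global max (with 0 floor) over all per-group prefix sums.
import Mathlib
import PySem

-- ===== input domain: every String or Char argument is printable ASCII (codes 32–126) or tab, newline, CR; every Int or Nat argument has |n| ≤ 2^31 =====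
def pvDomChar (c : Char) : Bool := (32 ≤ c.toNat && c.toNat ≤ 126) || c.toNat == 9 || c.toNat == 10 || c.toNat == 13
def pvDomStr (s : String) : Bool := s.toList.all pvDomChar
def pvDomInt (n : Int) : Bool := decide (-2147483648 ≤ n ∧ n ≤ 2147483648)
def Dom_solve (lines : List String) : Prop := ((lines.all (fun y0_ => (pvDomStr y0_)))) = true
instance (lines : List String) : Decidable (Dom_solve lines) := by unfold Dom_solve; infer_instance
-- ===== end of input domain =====

-- B re-decomposes A's interleaved accumulate-and-max loop into two passes
-- (group at blank lines, then max over all per-group prefix sums); same cost, alternative structure.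

-- ===== PORT A =====
-- int(line); Pre_solve guarantees the parse succeeds (Python would raise ValueError otherwise)
def pvVal (line : String) : Int := (PySem.Int.ofStr? line).getD 0

def pvStepA (st : Int × Int) (line : String) : Int × Int :=
  if PySem.Str.strip line = "" then (0, st.2)
  else (st.1 + pvVal line, max st.2 (st.1 + pvVal line))

def solve (lines : List String) : Int :=
  (lines.foldl pvStepA (0, 0)).2

-- ===== PORT B =====
-- _prefix_sums with running sum s (the loop's accumulator)
def pvPrefixSums (s : Int) : List Int → List Int
  | [] => []
  | x :: xs => (s + x) :: pvPrefixSums (s + x) xs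

def pvStepB (st : List (List Int) × List Int) (line : String) : List (List Int) × List Int :=
  if PySem.Str.strip line = "" then (st.1 ++ [st.2], [])
  else (st.1, st.2 ++ [pvVal line])

def solve_alt (lines : List String) : Int :=
  let st := lines.foldl pvStepB ([], [])
  -- groups = st.1 ++ [st.2]; max([0] + allsums)
  List.foldl max 0 ((st.1 ++ [st.2]).flatMap (pvPrefixSums 0))

-- ===== PRECONDITION & SPEC =====
-- Pre_ excludes exactly the inputs where Python's int(line) raises ValueError on a non-blank line.
def Pre_solve (lines : List String) : Prop :=
  (lines.all (fun l => (PySem.Str.strip l == "") || (PySem.Int.ofStr? l).isSome)) = true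
instance (lines : List String) : Decidable (Pre_solve lines) := by unfold Pre_solve; infer_instance

def pvWitness_solve : List String := ["100", "200", "", "  ", "50", "+5", " 7 "]

def Spec_solve (lines : List String) (out : Int) : Prop := out = solve_alt lines
instance (lines : List String) (out : Int) : Decidable (Spec_solve lines out) := by unfold Spec_solve; infer_instance

-- ===== CLAIM (what is proved, stated in full; the proofs are below) =====
def Claim_equal_solve : Prop := ∀ (lines : List String), Dom_solve lines → Pre_solve lines → Spec_solve lines (solve lines)

-- ===== LEMMAS AND PROOFS =====

theorem pvPrefixSums_snoc (g : List Int) (s x : Int) :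
    pvPrefixSums s (g ++ [x]) = pvPrefixSums s g ++ [s + g.sum + x] := by
  induction g generalizing s with
  | nil => simp [pvPrefixSums]
  | cons y ys ih =>
      simp only [List.cons_append, pvPrefixSums, ih, List.sum_cons]
      ring_nf

theorem pv_foldl_max_snoc (l : List Int) (a x : Int) :
    List.foldl max a (l ++ [x]) = max (List.foldl max a l) x := by
  simp [List.foldl_append]

theorem pv_key (lines : List String) :
    ∀ (done : List (List Int)) (cur : List Int),
      (lines.foldl pvStepA (cur.sum, List.foldl max 0 ((done ++ [cur]).flatMap (pvPrefixSums 0)))).2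
        = (fun st : List (List Int) × List Int =>
            List.foldl max 0 ((st.1 ++ [st.2]).flatMap (pvPrefixSums 0)))
            (lines.foldl pvStepB (done, cur)) := by
  induction lines with
  | nil => intro done cur; simp
  | cons line rest ih =>
      intro done cur
      by_cases h : PySem.Str.strip line = ""
      · have hA : pvStepA (cur.sum, List.foldl max 0 ((done ++ [cur]).flatMap (pvPrefixSums 0))) line
            = (0, List.foldl max 0 ((done ++ [cur]).flatMap (pvPrefixSums 0))) := by
          simp [pvStepA, h]
        have hB : pvStepB (done, cur) line = (done ++ [cur], []) := by simp [pvStepB, h]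
        have := ih (done ++ [cur]) []
        simp only [List.foldl_cons, hA, hB]
        simpa [pvPrefixSums] using this
      · have hA : pvStepA (cur.sum, List.foldl max 0 ((done ++ [cur]).flatMap (pvPrefixSums 0))) line
            = (cur.sum + pvVal line,
               max (List.foldl max 0 ((done ++ [cur]).flatMap (pvPrefixSums 0))) (cur.sum + pvVal line)) := by
          simp [pvStepA, h]
        have hB : pvStepB (done, cur) line = (done, cur ++ [pvVal line]) := by simp [pvStepB, h]
        have hsum : (cur ++ [pvVal line]).sum = cur.sum + pvVal line := by simp
        have hmax :
            List.foldl max 0 ((done ++ [cur ++ [pvVal line]]).flatMap (pvPrefixSums 0))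
              = max (List.foldl max 0 ((done ++ [cur]).flatMap (pvPrefixSums 0))) (cur.sum + pvVal line) := by
          simp only [List.flatMap_append, List.flatMap_cons, List.flatMap_nil, List.append_nil,
            pvPrefixSums_snoc, zero_add]
          rw [← List.append_assoc, pv_foldl_max_snoc]
        have := ih done (cur ++ [pvVal line])
        simp only [List.foldl_cons, hA, hB]
        rw [← hmax, ← hsum]
        exact this

-- ===== VERDICT (by name: the statement is the Claim_ definition above) =====
theorem solve_spec : Claim_equal_solve := by
  intro lines _ _
  unfold Spec_solve solve solve_alt
  simpa [pvPrefixSums] using pv_key lines [] []
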